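-- pv_equiv track=rewrite | github.com/jtn0123/GOES_VFI | run_all_tests_fancy.py | _shorten_path_simple
-- ===== SOURCE A (Python) =====
-- def _shorten_path_simple(path: str, max_length: int) -> str:
--     """Simple path shortening for summary display."""
--     if len(path) <= max_length:
--         return path
--
--     parts = path.split('/')
--     if len(parts) > 1:
--         filename = parts[-1]
--         if len(filename) < max_length - 3:
--             # Try to keep important directories
--             for i in range(len(parts) - 2, -1, -1):
--                 if parts[i] in ['tests', 'goesvfi'] or i == 0:
--                     candidate = '/'.join(parts[i:])
--                     if len(candidate) <= max_length:
--                         return candidate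
--                     return f".../{'/'.join(parts[i:])}"
--         return "..." + filename
--
--     return "..." + path[-(max_length-3):]
-- ===== SOURCE B (Python) =====
-- def _shorten_path_simple(path: str, max_length: int) -> str:
--     """Simple path shortening for summary display."""
--     if len(path) <= max_length:
--         return path
--
--     slash = path.rfind('/')
--     if slash < 0:
--         return "..." + path[-(max_length - 3):]
--
--     filename = path[slash + 1:]
--     if len(filename) >= max_length - 3:
--         return "..." + filename
--
--     # work on the raw string: the last full component 'tests' or 'goesvfi'
--     # (other than the first component) starts right after the '/' at index cut
--     head = path[:slash + 1]
--     cut = max(head.rfind("/tests/"), head.rfind("/goesvfi/"))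
--     candidate = path[cut + 1:]          # cut == -1 -> the whole path
--     if len(candidate) <= max_length:
--         return candidate
--     return ".../" + candidate
-- ===== Notes on version B (the rewrite author's own statement) =====
-- stated objective: alternative
-- what changed: B never splits the path into a component list: it locates the filename with str.rfind('/') and finds the cut point by searching the raw string for the last occurrence of the substrings '/tests/' or '/goesvfi/', then slices the path once, instead of A's split plus index scan with join inside the loop.
import Mathlib
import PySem

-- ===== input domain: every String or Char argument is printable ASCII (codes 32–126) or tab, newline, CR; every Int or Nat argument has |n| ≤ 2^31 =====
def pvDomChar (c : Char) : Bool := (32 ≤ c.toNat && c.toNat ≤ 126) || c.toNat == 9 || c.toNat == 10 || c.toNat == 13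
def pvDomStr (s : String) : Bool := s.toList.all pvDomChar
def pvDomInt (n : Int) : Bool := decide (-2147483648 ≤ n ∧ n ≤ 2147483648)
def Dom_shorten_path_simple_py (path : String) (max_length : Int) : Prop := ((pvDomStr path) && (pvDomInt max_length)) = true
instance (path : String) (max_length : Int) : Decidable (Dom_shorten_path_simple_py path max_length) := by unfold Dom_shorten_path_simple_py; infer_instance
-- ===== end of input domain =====

-- B never splits the path into a component list: it finds the filename with rfind('/') and the cut
-- point by searching the raw string for the last '/tests/' or '/goesvfi/' substring (objective: alternative).

-- ===== PORT A =====
-- the for-loop 'for i in range(len(parts)-2, -1, -1)' with its early returns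
def pvA_loop (parts : List String) (max_length : Int) (filename : String) : List Int → String
  | [] => "..." ++ filename
  | i :: rest =>
    -- parts[i]: i is always in range here, so the .getD "" default is never used
    if (PySem.List.pyGet? parts i).getD "" = "tests" ∨
       (PySem.List.pyGet? parts i).getD "" = "goesvfi" ∨ i = 0 then
      let candidate := PySem.Str.join "/" (PySem.List.slice parts (some i) none)
      if PySem.Str.len candidate ≤ max_length then candidate
      else ".../" ++ candidate
    else pvA_loop parts max_length filename rest

def shorten_path_simple_py (path : String) (max_length : Int) : String :=
  if PySem.Str.len path ≤ max_length then path
  else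
    let parts := (PySem.Str.split? path "/").getD []   -- sep "/" ≠ "": split? never raises
    if 1 < (parts.length : Int) then
      let filename := (PySem.List.pyGet? parts (-1)).getD ""   -- parts is never empty
      if PySem.Str.len filename < max_length - 3 then
        pvA_loop parts max_length filename (PySem.List.pyRange ((parts.length : Int) - 2) (-1) (-1))
      else "..." ++ filename
    else "..." ++ PySem.Str.slice path (some (-(max_length - 3))) none

-- ===== PORT B =====
def shorten_path_simple_py_alt (path : String) (max_length : Int) : String :=
  if PySem.Str.len path ≤ max_length then path
  else
    let slash := PySem.Str.rfind path "/"
    if slash < 0 then "..." ++ PySem.Str.slice path (some (-(max_length - 3))) none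
    else
      let filename := PySem.Str.slice path (some (slash + 1)) none
      if max_length - 3 ≤ PySem.Str.len filename then "..." ++ filename
      else
        let head := PySem.Str.slice path none (some (slash + 1))
        let cut := max (PySem.Str.rfind head "/tests/") (PySem.Str.rfind head "/goesvfi/")
        let candidate := PySem.Str.slice path (some (cut + 1)) none
        if PySem.Str.len candidate ≤ max_length then candidate
        else ".../" ++ candidate

-- ===== PRECONDITION & SPEC =====
def Spec_shorten_path_simple_py (path : String) (max_length : Int) (out : String) : Prop := out = shorten_path_simple_py_alt path max_length
instance (path : String) (max_length : Int) (out : String) : Decidable (Spec_shorten_path_simple_py path max_length out) := by unfold Spec_shorten_path_simple_py; infer_instance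

-- ===== CLAIM (what is proved, stated in full; the proofs are below) =====
def Claim_equal_shorten_path_simple_py : Prop := ∀ (path : String) (max_length : Int), Dom_shorten_path_simple_py path max_length → Spec_shorten_path_simple_py path max_length (shorten_path_simple_py path max_length)

-- ===== LEMMAS AND PROOFS =====

-- the shared formatting block of both programs, as a function of the cut index
def pvFmt (parts : List String) (max_length j : Int) : String :=
  let candidate := PySem.Str.join "/" (PySem.List.slice parts (some j) none)
  if PySem.Str.len candidate ≤ max_length then candidate
  else ".../" ++ candidate

-- A's scan result: highest matching index among the first k+1 components of l
def pvG (l : List String) (k : Nat) : Int :=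
  (PySem.List.enumerate (l.take (k + 1))).foldl
    (fun idx p => if 0 < p.1 ∧ (p.2 = "tests" ∨ p.2 = "goesvfi") then p.1 else idx) 0

def pvGn (l : List String) : Int :=
  (PySem.List.enumerate l).foldl
    (fun idx p => if 0 < p.1 ∧ (p.2 = "tests" ∨ p.2 = "goesvfi") then p.1 else idx) 0

-- reference form of str.split('/')
def pvSos : List Char → List Char → List (List Char)
  | pre, [] => [pre]
  | pre, c :: rest => if c = '/' then pre :: pvSos [] rest else pvSos (pre ++ [c]) rest

-- the characters of the components q, each with its trailing '/'
def pvH (q : List (List Char)) : List Char := (q.map (fun a => a ++ ['/'])).flatten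

-- char position of the '/' preceding the last component equal to t (component index ≥ 1), else -1
def pvCutAux : List (List Char) → List Char → Int → Int → Int
  | [], _, _, best => best
  | a :: rest, t, start, best =>
      pvCutAux rest t (start + (a.length : Int) + 1) (if a = t ∧ start ≠ 0 then start - 1 else best)

def pvCut (q : List (List Char)) (t : List Char) : Int := pvCutAux q t 0 (-1)

-- ---- split machinery ----
theorem pv_go_sos (fuel : Nat) : ∀ (l cur : List Char) (acc : List (List Char)), l.length < fuel →
    PySem.Chars.splitOn.go ['/'] fuel l cur acc = acc.reverse ++ pvSos cur.reverse l := by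
  induction fuel with
  | zero => intro l cur acc h; omega
  | succ n ih =>
    intro l cur acc h
    rw [PySem.Chars.splitOn.go.eq_def]
    cases l with
    | nil => simp [pvSos]
    | cons c rest =>
      dsimp only
      by_cases hc : c = '/'
      · rw [if_pos (by simp [List.isPrefixOf, hc])]
        subst hc
        rw [show List.drop ['/'].length ('/' :: rest) = rest from rfl,
            ih rest [] (cur.reverse :: acc) (by simpa using h)]
        simp [pvSos]
      · rw [if_neg (by simp [List.isPrefixOf]; exact fun hh => hc hh.symm)]
        rw [ih rest (c :: cur) acc (by simpa using Nat.lt_of_succ_lt_succ h)]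
        simp [pvSos, hc]

theorem pv_splitOn_eq (cs : List Char) : PySem.Chars.splitOn cs ['/'] = pvSos [] cs := by
  have := pv_go_sos (cs.length + 1) cs [] [] (by omega)
  simpa [PySem.Chars.splitOn] using this

theorem pvSos_ne_nil (l pre : List Char) : pvSos pre l ≠ [] := by
  induction l generalizing pre with
  | nil => simp [pvSos]
  | cons c rest ih =>
    rw [pvSos]
    split
    · simp
    · exact ih _

theorem pv_join_pvSos (l : List Char) : ∀ pre, PySem.Chars.join ['/'] (pvSos pre l) = pre ++ l := by
  induction l with
  | nil => intro pre; simp [pvSos, PySem.Chars.join_singleton]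
  | cons c rest ih =>
    intro pre
    rw [pvSos]
    by_cases hc : c = '/'
    · rw [if_pos hc]
      obtain ⟨x, xs, hx⟩ := List.exists_cons_of_ne_nil (pvSos_ne_nil rest [])
      rw [hx, PySem.Chars.join_cons_cons, ← hx, ih []]
      simp [hc]
    · rw [if_neg hc, ih (pre ++ [c])]
      simp

theorem pv_mem_pvSos (l : List Char) : ∀ pre p, '/' ∉ pre → p ∈ pvSos pre l → '/' ∉ p := by
  induction l with
  | nil => intro pre p hpre hp; simp [pvSos] at hp; simpa [hp] using hpre
  | cons c rest ih =>
    intro pre p hpre hp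
    rw [pvSos] at hp
    by_cases hc : c = '/'
    · rw [if_pos hc] at hp
      rcases List.mem_cons.mp hp with h | h
      · simpa [h] using hpre
      · exact ih [] p (by simp) h
    · rw [if_neg hc] at hp
      exact ih (pre ++ [c]) p (by simp [hpre]; exact fun h => hc h.symm) hp

theorem pv_length_pvSos (l : List Char) : ∀ pre, (pvSos pre l).length = l.count '/' + 1 := by
  induction l with
  | nil => intro pre; simp [pvSos]
  | cons c rest ih =>
    intro pre
    rw [pvSos]
    by_cases hc : c = '/'
    · rw [if_pos hc]
      simp [hc, ih []]
    · rw [if_neg hc]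
      have : ¬ (c == '/') = true := by simpa using hc
      simp [List.count_cons, this, ih (pre ++ [c])]

-- ---- pvH machinery ----
theorem pvH_append (xs ys : List (List Char)) : pvH (xs ++ ys) = pvH xs ++ pvH ys := by
  simp [pvH]

theorem pvH_nil : pvH [] = [] := rfl

theorem pv_join_snoc (q : List (List Char)) (fn : List Char) (h : q ≠ []) :
    PySem.Chars.join ['/'] (q ++ [fn]) = pvH q ++ fn := by
  induction q with
  | nil => exact absurd rfl h
  | cons a q' ih =>
    cases q' with
    | nil =>
      rw [List.cons_append, List.nil_append, PySem.Chars.join_cons_cons,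
          PySem.Chars.join_singleton]
      simp [pvH]
    | cons b q'' =>
      rw [List.cons_append, show (b :: q'') ++ [fn] = b :: (q'' ++ [fn]) from rfl,
          PySem.Chars.join_cons_cons, show b :: (q'' ++ [fn]) = (b :: q'') ++ [fn] from rfl,
          ih (by simp)]
      simp [pvH]

theorem pvH_ends_slash (q : List (List Char)) (h : q ≠ []) : ∃ X, pvH q = X ++ ['/'] := by
  rcases List.eq_nil_or_concat q with rfl | ⟨xs, a, rfl⟩
  · exact absurd rfl h
  · refine ⟨pvH xs ++ a, ?_⟩
    rw [← List.concat_eq_append, List.concat_eq_append, pvH_append]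
    simp [pvH]

theorem pvH_length_pos (q : List (List Char)) (h : q ≠ []) : 0 < (pvH q).length := by
  obtain ⟨X, hX⟩ := pvH_ends_slash q h
  simp [hX]

-- ---- rfind machinery ----
theorem pv_rfind_go_cases (s sub : List Char) (k : Nat) :
    (PySem.Chars.rfind.go s sub k = -1 ∧ ∀ p, p ≤ k → ¬ sub <+: s.drop p) ∨
    (∃ p : Nat, PySem.Chars.rfind.go s sub k = p ∧ p ≤ k ∧ sub <+: s.drop p ∧
      ∀ q, p < q → q ≤ k → ¬ sub <+: s.drop q) := by
  induction k with
  | zero =>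
    rw [PySem.Chars.rfind.go.eq_def]
    dsimp only
    by_cases h : sub <+: s
    · right
      exact ⟨0, by rw [if_pos (List.isPrefixOf_iff_prefix.mpr h)]; norm_num, le_refl 0,
        by simpa using h, fun q hq hq' => absurd (lt_of_lt_of_le hq hq') (by omega)⟩
    · left
      refine ⟨by rw [if_neg (by simpa [List.isPrefixOf_iff_prefix] using h)], ?_⟩
      intro p hp
      interval_cases p
      simpa using h
  | succ k ih =>
    rw [PySem.Chars.rfind.go.eq_def]
    dsimp only
    by_cases h : sub <+: s.drop (k + 1)
    · right
      exact ⟨k + 1, by rw [if_pos (List.isPrefixOf_iff_prefix.mpr h)], le_refl _, h,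
        fun q hq hq' => absurd (lt_of_lt_of_le hq hq') (by omega)⟩
    · rw [if_neg (by simpa [List.isPrefixOf_iff_prefix] using h)]
      rcases ih with ⟨he, hno⟩ | ⟨p, he, hpk, hocc, hmax⟩
      · left
        refine ⟨he, fun p hp => ?_⟩
        rcases Nat.lt_or_ge p (k + 1) with h' | h'
        · exact hno p (by omega)
        · have : p = k + 1 := by omega
          simpa [this] using h
      · right
        refine ⟨p, he, by omega, hocc, fun q hq hq' => ?_⟩
        rcases Nat.lt_or_ge q (k + 1) with h' | h'
        · exact hmax q hq (by omega)
        · have : q = k + 1 := by omega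
          simpa [this] using h

theorem pv_occ_lt (s sub : List Char) (hs : sub ≠ []) (p : Nat) (hp : sub <+: s.drop p) :
    p < s.length := by
  by_contra h
  rw [List.drop_eq_nil_of_le (by omega)] at hp
  exact hs (List.prefix_nil.mp hp)

theorem pv_rfind_eq_neg (s sub : List Char) (h : ∀ p : Nat, ¬ sub <+: s.drop p) :
    PySem.Chars.rfind s sub = -1 := by
  rcases pv_rfind_go_cases s sub s.length with ⟨he, _⟩ | ⟨p, _, _, hocc, _⟩
  · exact he
  · exact absurd hocc (h p)

theorem pv_rfind_eq_pos (s sub : List Char) (hs : sub ≠ []) (p : Nat) (hp : sub <+: s.drop p)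
    (hmax : ∀ q : Nat, p < q → ¬ sub <+: s.drop q) : PySem.Chars.rfind s sub = p := by
  rcases pv_rfind_go_cases s sub s.length with ⟨_, hno⟩ | ⟨p', he, hp'k, hocc', hmax'⟩
  · exact absurd hp (hno p (le_of_lt (pv_occ_lt s sub hs p hp)))
  · have hple : p ≤ s.length := le_of_lt (pv_occ_lt s sub hs p hp)
    rcases Nat.lt_trichotomy p p' with h' | h' | h'
    · exact absurd hocc' (hmax p' h')
    · show PySem.Chars.rfind.go s sub s.length = (p : Int)
      rw [he, h']
    · exact absurd hp (hmax' p h' hple)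

theorem pv_single_prefix_iff (l : List Char) (c : Char) (p : Nat) :
    ([c] <+: l.drop p) ↔ l[p]? = some c := by
  have hd : (l.drop p)[0]? = l[p]? := by
    rw [List.getElem?_drop, Nat.add_zero]
  cases h : l.drop p with
  | nil =>
    rw [h] at hd
    simp [← hd, List.prefix_nil]
  | cons d ds =>
    rw [h] at hd
    simp only [List.getElem?_cons_zero] at hd
    rw [← hd]
    constructor
    · intro hpre
      have := (List.cons_prefix_cons.mp hpre).1
      simp [this]
    · intro hc
      have hdc : d = c := by
        simpa using hc
      exact List.cons_prefix_cons.mpr ⟨hdc.symm, List.nil_prefix⟩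

theorem pv_prefix_head (c : Char) (r l : List Char) (h : (c :: r) <+: l) : l[0]? = some c := by
  cases l with
  | nil => exact absurd (List.prefix_nil.mp h) (by simp)
  | cons d ds =>
    have := (List.cons_prefix_cons.mp h).1
    simp [this]

theorem pv_prefix_extend (sub x y : List Char) (h : sub <+: x) : sub <+: x ++ y := by
  exact h.trans (List.prefix_append x y)

theorem pv_prefix_restrict (sub x y : List Char) (p : Nat) (h : sub <+: (x ++ y).drop p)
    (hle : p + sub.length ≤ x.length) : sub <+: x.drop p := by
  rcases List.eq_nil_or_concat sub with rfl | hne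
  · exact List.nil_prefix
  have hlen : sub.length ≤ (x.drop p).length := by
    rw [List.length_drop]; omega
  rw [List.prefix_iff_eq_take] at h ⊢
  rw [List.drop_append_of_le_length (by omega), List.take_append_of_le_length hlen] at h
  exact h

-- no occurrence of '/t/' inside a single component region a ++ ['/']
theorem pv_no_occ_in_comp (a t : List Char) (ha : '/' ∉ a) (m : Nat) :
    ¬ ('/' :: (t ++ ['/'])) <+: (a ++ ['/']).drop m := by
  intro hp
  have hlt : m < (a ++ ['/']).length := pv_occ_lt _ _ (by simp) m hp
  simp only [List.length_append, List.length_cons, List.length_nil] at hlt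
  by_cases hm : m < a.length
  · have hh := pv_prefix_head _ _ _ hp
    rw [List.getElem?_drop, Nat.add_zero, List.getElem?_append_left hm,
        List.getElem?_eq_getElem hm] at hh
    have : a[m] = '/' := by simpa using hh
    exact ha (this ▸ List.getElem_mem hm)
  · have hme : m = a.length := by simp at hlt; omega
    subst hme
    rw [List.drop_left] at hp
    have := hp.length_le
    simp at this

-- occurrences of '/t/' are unchanged by appending a non-matching component
theorem pv_occ_transfer (s' a t : List Char)
    (hx : s' = [] ∨ ∃ X, s' = X ++ ['/']) (ha : '/' ∉ a) (hat : a ≠ t) (ht : '/' ∉ t) (p : Nat) :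
    ('/' :: (t ++ ['/'])) <+: ((s' ++ (a ++ ['/'])).drop p) ↔ ('/' :: (t ++ ['/'])) <+: (s'.drop p) := by
  constructor
  · intro h
    by_cases hp : p + ('/' :: (t ++ ['/'])).length ≤ s'.length
    · exact pv_prefix_restrict _ _ _ _ h hp
    · exfalso
      have hlen : p + ('/' :: (t ++ ['/'])).length ≤ s'.length + a.length + 1 := by
        have := h.length_le
        simp only [List.length_drop, List.length_append, List.length_cons,
          List.length_nil] at this ⊢
        omega
      simp only [List.length_cons, List.length_append, List.length_nil] at hp hlen
      by_cases hpn : s'.length ≤ p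
      · -- p starts inside a ++ ['/']
        by_cases hpa : p < s'.length + a.length
        · have hh := pv_prefix_head _ _ _ h
          rw [List.getElem?_drop, Nat.add_zero, List.getElem?_append_right hpn,
              List.getElem?_append_left (by omega),
              List.getElem?_eq_getElem (by omega)] at hh
          have : a[p - s'.length] = '/' := by simpa using hh
          exact ha (this ▸ List.getElem_mem (by omega))
        · omega
      · -- p starts inside s'
        have hpn' : p < s'.length := by omega
        rcases hx with rfl | ⟨X, rfl⟩
        · simp at hpn'
        simp only [List.length_append, List.length_cons, List.length_nil] at hpn' hp hlen
        by_cases hpX : p = X.length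
        · subst hpX
          rw [List.append_assoc, List.drop_left] at h
          have hta : t ++ ['/'] <+: a ++ ['/'] := by
            have := List.cons_prefix_cons.mp h
            simpa using this.2
          have htake := List.prefix_iff_eq_take.mp hta
          rcases Nat.lt_trichotomy t.length a.length with hl | hl | hl
          · have e1 : (t ++ ['/'])[t.length]? = some '/' := by
              rw [List.getElem?_append_right (le_refl _)]; simp
            have e2 : (t ++ ['/'])[t.length]? = a[t.length]? := by
              conv_lhs => rw [htake]
              rw [List.getElem?_take, if_pos (by simp), List.getElem?_append_left hl]
            rw [e2, List.getElem?_eq_getElem hl] at e1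
            have : a[t.length] = '/' := by simpa using e1
            exact ha (this ▸ List.getElem_mem hl)
          · have := hta.eq_of_length (by simp [hl])
            exact hat ((List.append_inj this (by simp [hl])).1.symm)
          · have e1 : (t ++ ['/'])[a.length]? = t[a.length]? := by
              rw [List.getElem?_append_left hl]
            have e2 : (t ++ ['/'])[a.length]? = some '/' := by
              conv_lhs => rw [htake]
              rw [List.getElem?_take, if_pos (by simp; omega),
                List.getElem?_append_right (le_refl _)]
              simp
            rw [e1, List.getElem?_eq_getElem hl] at e2
            have : t[a.length] = '/' := by simpa using e2
            exact ht (this ▸ List.getElem_mem hl)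
        · -- p < X.length : the '/' ending s' falls strictly inside the pattern
          have hpX' : p < X.length := by omega
          have hd : X.length - p < ('/' :: (t ++ ['/'])).length := by simp; omega
          have hd1 : 1 ≤ X.length - p := by omega
          have hdle : X.length - p ≤ t.length := by omega
          have hdp : ('/' :: (t ++ ['/']))[X.length - p]? =
              ((X ++ ['/']) ++ (a ++ ['/']))[p + (X.length - p)]? := by
            conv_lhs => rw [List.prefix_iff_eq_take.mp h]
            rw [List.getElem?_take, if_pos hd, List.getElem?_drop]
          have hpx : p + (X.length - p) = X.length := by omega
          have hsl : ((X ++ ['/']) ++ (a ++ ['/']))[X.length]? = some '/' := by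
            rw [List.append_assoc, List.getElem?_append_right (le_refl _)]
            simp
          rw [hpx, hsl] at hdp
          have hoff : X.length - p - 1 < t.length := by omega
          rcases Nat.exists_eq_add_of_le hd1 with ⟨e, he⟩
          have het : e < t.length := by omega
          rw [he, show 1 + e = e + 1 from by omega, List.getElem?_cons_succ,
              List.getElem?_append_left het, List.getElem?_eq_getElem het] at hdp
          have : t[e] = '/' := by simpa using hdp
          exact ht (this ▸ List.getElem_mem het)
  · intro h
    have hplt : p < s'.length := pv_occ_lt _ _ (by simp) p h
    rw [List.drop_append_of_le_length (by omega)]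
    exact pv_prefix_extend _ _ _ h

theorem pv_rfind_transfer (s' a t : List Char)
    (hx : s' = [] ∨ ∃ X, s' = X ++ ['/']) (ha : '/' ∉ a) (hat : a ≠ t) (ht : '/' ∉ t) :
    PySem.Chars.rfind (s' ++ (a ++ ['/'])) ('/' :: (t ++ ['/'])) =
      PySem.Chars.rfind s' ('/' :: (t ++ ['/'])) := by
  set pat := '/' :: (t ++ ['/']) with hpat
  have hpne : pat ≠ [] := by simp [hpat]
  rcases pv_rfind_go_cases s' pat s'.length with ⟨he, hno⟩ | ⟨p, he, hpk, hocc, hmax⟩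
  · have hno' : ∀ p : Nat, ¬ pat <+: s'.drop p := by
      intro p hp
      rcases Nat.lt_or_ge p (s'.length + 1) with h' | h'
      · exact hno p (by omega) hp
      · exact absurd (pv_occ_lt _ _ hpne p hp) (by omega)
    rw [show PySem.Chars.rfind s' pat = PySem.Chars.rfind.go s' pat s'.length from rfl, he]
    exact pv_rfind_eq_neg _ _ (fun p hp =>
      hno' p ((pv_occ_transfer s' a t hx ha hat ht p).mp hp))
  · have hmax' : ∀ q : Nat, p < q → ¬ pat <+: s'.drop q := by
      intro q hq hocc2
      rcases Nat.lt_or_ge q (s'.length + 1) with h' | h'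
      · exact hmax q hq (by omega) hocc2
      · exact absurd (pv_occ_lt _ _ hpne q hocc2) (by omega)
    rw [show PySem.Chars.rfind s' pat = PySem.Chars.rfind.go s' pat s'.length from rfl, he]
    exact pv_rfind_eq_pos _ _ hpne p
      ((pv_occ_transfer s' a t hx ha hat ht p).mpr hocc)
      (fun q hq hocc2 => hmax' q hq ((pv_occ_transfer s' a t hx ha hat ht q).mp hocc2))

-- ---- pvCut arithmetic ----
theorem pvCutAux_append (xs : List (List Char)) (a t : List Char) :
    ∀ s b, pvCutAux (xs ++ [a]) t s b =
      if a = t ∧ s + ((pvH xs).length : Int) ≠ 0 then s + ((pvH xs).length : Int) - 1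
      else pvCutAux xs t s b := by
  induction xs with
  | nil => intro s b; simp [pvCutAux, pvH_nil]
  | cons x xs ih =>
    intro s b
    have hlen : ((pvH (x :: xs)).length : Int) = (x.length : Int) + 1 + ((pvH xs).length : Int) := by
      simp [pvH]; ring
    rw [List.cons_append, pvCutAux, pvCutAux, ih, hlen]
    by_cases hc : a = t ∧ s + ((x.length : Int) + 1 + ((pvH xs).length : Int)) ≠ 0
    · rw [if_pos ⟨hc.1, by have := hc.2; omega⟩, if_pos hc]
      ring
    · rw [if_neg (by intro hh; exact hc ⟨hh.1, by have := hh.2; omega⟩), if_neg hc]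

theorem pvCutAux_le (q : List (List Char)) (t : List Char) :
    ∀ s b : Int, b ≤ s - 1 → pvCutAux q t s b ≤ s + ((pvH q).length : Int) - 1 := by
  induction q with
  | nil => intro s b hb; simp [pvCutAux, pvH_nil]; omega
  | cons a rest ih =>
    intro s b hb
    rw [pvCutAux]
    have hlen : ((pvH (a :: rest)).length : Int) = (a.length : Int) + 1 + ((pvH rest).length : Int) := by
      simp [pvH]; ring
    have := ih (s + (a.length : Int) + 1)
      (if a = t ∧ s ≠ 0 then s - 1 else b)
      (by split_ifs <;> omega)
    omega

theorem pv_rfind_pvH (q : List (List Char)) (t : List Char)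
    (hq : ∀ a ∈ q, '/' ∉ a) (ht : '/' ∉ t) :
    PySem.Chars.rfind (pvH q) ('/' :: (t ++ ['/'])) = pvCut q t := by
  induction q using List.reverseRecOn with
  | nil =>
    rw [pvH_nil, pv_rfind_eq_neg _ _ (by intro p; simp [List.drop_nil])]
    rfl
  | append_singleton xs a ih =>
    have ha : '/' ∉ a := hq a (by simp)
    have hxs : ∀ b ∈ xs, '/' ∉ b := fun b hb => hq b (by simp [hb])
    have hsingle : pvH [a] = a ++ ['/'] := by simp [pvH]
    by_cases hxsnil : xs = []
    · subst hxsnil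
      rw [List.nil_append, hsingle,
          pv_rfind_eq_neg _ _ (fun m => pv_no_occ_in_comp a t ha m)]
      simp [pvCut, pvCutAux]
    · rw [pvH_append, hsingle]
      by_cases hat : a = t
      · subst hat
        obtain ⟨X, hX⟩ := pvH_ends_slash xs hxsnil
        have hXlen : (pvH xs).length = X.length + 1 := by simp [hX]
        have hocc : ('/' :: (a ++ ['/'])) <+: (pvH xs ++ (a ++ ['/'])).drop X.length := by
          rw [hX, List.append_assoc, List.drop_left, List.singleton_append]
        have hmax : ∀ m : Nat, X.length < m →
            ¬ ('/' :: (a ++ ['/'])) <+: (pvH xs ++ (a ++ ['/'])).drop m := by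
          intro m hm hp
          have hm' : (pvH xs).length ≤ m := by omega
          rcases Nat.exists_eq_add_of_le hm' with ⟨e, he⟩
          rw [he, List.drop_append, List.drop_eq_nil_of_le (by omega), List.nil_append,
              show (pvH xs).length + e - (pvH xs).length = e from by omega] at hp
          exact pv_no_occ_in_comp a a ha e hp
        rw [pv_rfind_eq_pos _ _ (by simp) X.length hocc hmax,
            pvCut, pvCutAux_append,
            if_pos ⟨rfl, by have := pvH_length_pos xs hxsnil; omega⟩]
        omega
      · rw [pv_rfind_transfer (pvH xs) a t (Or.inr (pvH_ends_slash xs hxsnil)) ha hat ht,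
            ih hxs, pvCut, pvCut, pvCutAux_append, if_neg (by tauto)]

-- ---- pvGn ----
theorem pvGn_append (q : List String) (a : String) :
    pvGn (q ++ [a]) = if 0 < q.length ∧ (a = "tests" ∨ a = "goesvfi") then (q.length : Int) else pvGn q := by
  unfold pvGn
  rw [PySem.List.enumerate_append, List.foldl_append]
  simp only [PySem.List.enumerate_cons, PySem.List.enumerate_nil, List.foldl_cons,
    List.foldl_nil, zero_add]
  by_cases h : 0 < q.length ∧ (a = "tests" ∨ a = "goesvfi")
  · rw [if_pos ⟨by exact_mod_cast h.1, h.2⟩, if_pos h]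
  · rw [if_neg (by intro hh; exact h ⟨by exact_mod_cast hh.1, hh.2⟩), if_neg h]

theorem pvGn_range (q : List String) (h : q ≠ []) : ∃ n : Nat, pvGn q = (n : Int) ∧ n < q.length := by
  induction q using List.reverseRecOn with
  | nil => exact absurd rfl h
  | append_singleton xs a ih =>
    rw [pvGn_append]
    by_cases hc : 0 < xs.length ∧ (a = "tests" ∨ a = "goesvfi")
    · rw [if_pos hc]
      exact ⟨xs.length, rfl, by simp⟩
    · rw [if_neg hc]
      by_cases hxs : xs = []
      · subst hxs
        exact ⟨0, by simp [pvGn, PySem.List.enumerate_nil], by simp⟩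
      · obtain ⟨n, hn, hlt⟩ := ih hxs
        exact ⟨n, hn, by simp; omega⟩

theorem pvG_full (q : List String) (h : q ≠ []) : pvG q (q.length - 1) = pvGn q := by
  unfold pvG pvGn
  rw [show q.length - 1 + 1 = q.length from
    Nat.succ_pred_eq_of_pos (List.length_pos_of_ne_nil h), List.take_length]

-- the combined cut position equals the position determined by A's best index
theorem pv_pos (q : List String) (h : q ≠ []) (hq : ∀ a ∈ q, '/' ∉ a.toList) :
    max (pvCut (q.map String.toList) "tests".toList) (pvCut (q.map String.toList) "goesvfi".toList)
      = if pvGn q = 0 then -1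
        else ((pvH ((q.map String.toList).take (pvGn q).toNat)).length : Int) - 1 := by
  induction q using List.reverseRecOn with
  | nil => exact absurd rfl h
  | append_singleton xs a ih =>
    have hq' : ∀ b ∈ xs, '/' ∉ b.toList := fun b hb => hq b (by simp [hb])
    have hmap : (xs ++ [a]).map String.toList = xs.map String.toList ++ [a.toList] := by
      simp
    have hcut : ∀ t : List Char, pvCut (xs.map String.toList ++ [a.toList]) t =
        if a.toList = t ∧ (((pvH (xs.map String.toList)).length : Int)) ≠ 0
        then ((pvH (xs.map String.toList)).length : Int) - 1
        else pvCut (xs.map String.toList) t := by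
      intro t
      rw [pvCut, pvCutAux_append]
      simp only [zero_add]
      rfl
    rw [hmap, hcut, hcut, pvGn_append]
    by_cases hxs : xs = []
    · subst hxs
      simp only [List.map_nil, List.nil_append, pvH_nil, List.length_nil, Nat.cast_zero,
        ne_eq, not_true_eq_false, and_false, if_false, List.length_nil, lt_irrefl,
        false_and, if_false]
      norm_num
      simp [pvCut, pvCutAux]
    · have hmapne : xs.map String.toList ≠ [] := by simp [hxs]
      have hpos : 0 < ((pvH (xs.map String.toList)).length : Int) := by
        exact_mod_cast pvH_length_pos _ hmapne
      by_cases hA : a = "tests" ∨ a = "goesvfi"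
      · have hlenpos : 0 < xs.length := List.length_pos_of_ne_nil hxs
        have hne0 : ((xs.length : Int)) ≠ 0 := by omega
        have htake : (xs.map String.toList ++ [a.toList]).take ((xs.length : Int)).toNat =
            xs.map String.toList := by
          rw [Int.toNat_natCast,
              show xs.length = (xs.map String.toList).length from by simp,
              List.take_left]
        have hbound : ∀ t : List Char, pvCut (xs.map String.toList) t ≤
            ((pvH (xs.map String.toList)).length : Int) - 1 := by
          intro t
          have := pvCutAux_le (xs.map String.toList) t 0 (-1) (by omega)
          simpa using this
        rcases hA with hA | hA
        · subst hA
          have hgn : (if 0 < xs.length ∧ (("tests" : String) = "tests" ∨ ("tests" : String) = "goesvfi")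
              then (xs.length : Int) else pvGn xs) = (xs.length : Int) :=
            if_pos ⟨hlenpos, Or.inl rfl⟩
          rw [if_pos ⟨rfl, by omega⟩,
              if_neg (fun hh => absurd hh.1 (by decide)),
              hgn, if_neg hne0, htake]
          exact max_eq_left (hbound _)
        · subst hA
          have hgn : (if 0 < xs.length ∧ (("goesvfi" : String) = "tests" ∨ ("goesvfi" : String) = "goesvfi")
              then (xs.length : Int) else pvGn xs) = (xs.length : Int) :=
            if_pos ⟨hlenpos, Or.inr rfl⟩
          rw [if_neg (fun hh => absurd hh.1 (by decide)),
              if_pos ⟨rfl, by omega⟩,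
              hgn, if_neg hne0, htake]
          exact max_eq_right (hbound _)
      · have hts : ¬ (a.toList = "tests".toList ∧ ((pvH (xs.map String.toList)).length : Int) ≠ 0) := by
          intro hh
          exact hA (Or.inl (String.toList_inj.mp hh.1))
        have hgs : ¬ (a.toList = "goesvfi".toList ∧ ((pvH (xs.map String.toList)).length : Int) ≠ 0) := by
          intro hh
          exact hA (Or.inr (String.toList_inj.mp hh.1))
        have hgn : (if 0 < xs.length ∧ (a = "tests" ∨ a = "goesvfi")
            then (xs.length : Int) else pvGn xs) = pvGn xs := if_neg (by tauto)
        rw [if_neg hts, if_neg hgs, hgn, ih hxs hq']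
        by_cases h0 : pvGn xs = 0
        · rw [if_pos h0, if_pos h0]
        · rw [if_neg h0, if_neg h0]
          obtain ⟨n, hn, hlt⟩ := pvGn_range xs hxs
          rw [hn, Int.toNat_natCast,
              List.take_append_of_le_length (by rw [List.length_map]; omega)]

-- ---- A-side loop reduction (A's countdown scan = formatting at the best index) ----
theorem pvG_zero (l : List String) : pvG l 0 = 0 := by
  cases l <;> simp [pvG, PySem.List.enumerate_nil, PySem.List.enumerate_cons]

theorem pvG_succ (l : List String) (k : Nat) (hk : k + 1 < l.length) :
    pvG l (k + 1) = if l[k + 1] = "tests" ∨ l[k + 1] = "goesvfi" then ((k : Int) + 1) else pvG l k := by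
  unfold pvG
  rw [List.take_add_one, List.getElem?_eq_getElem hk]
  rw [PySem.List.enumerate_append, List.foldl_append]
  simp only [Option.toList_some, List.length_take, PySem.List.enumerate_cons, PySem.List.enumerate_nil,
    List.foldl_cons, List.foldl_nil, Nat.min_eq_left (le_of_lt hk)]
  by_cases hs : (l[k + 1] = "tests" ∨ l[k + 1] = "goesvfi")
  · rw [if_pos hs, if_pos ⟨by push_cast; omega, hs⟩]
    push_cast; ring
  · rw [if_neg hs, if_neg (by intro hc; exact hs hc.2)]

theorem pvA_loop_eq (parts : List String) (ml : Int) (fn : String) (k : Nat)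
    (hk : k < parts.dropLast.length) :
    pvA_loop parts ml fn (PySem.List.pyRange (k : Int) (-1) (-1)) =
      pvFmt parts ml (pvG parts.dropLast k) := by
  induction k with
  | zero =>
    rw [show ((0 : Nat) : Int) = 0 by norm_num,
        PySem.List.pyRange_neg_one_cons (by omega),
        show (0 : Int) - 1 = -1 by norm_num,
        PySem.List.pyRange_neg_one_eq_nil (le_refl _)]
    rw [pvA_loop, if_pos (Or.inr (Or.inr rfl)), pvG_zero]
    rfl
  | succ n ih =>
    have hlt : n + 1 < parts.length := by
      have := parts.length_dropLast; omega
    rw [PySem.List.pyRange_neg_one_cons (by push_cast; omega),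
        show ((n + 1 : Nat) : Int) - 1 = ((n : Nat) : Int) by push_cast; ring]
    rw [pvA_loop]
    have hget : (PySem.List.pyGet? parts ((n + 1 : Nat) : Int)).getD "" = parts.dropLast[n + 1] := by
      rw [PySem.List.pyGet?_natCast, List.getElem?_eq_getElem hlt, Option.getD_some,
          List.getElem_dropLast]
    rw [hget]
    by_cases hs : (parts.dropLast[n + 1] = "tests" ∨ parts.dropLast[n + 1] = "goesvfi")
    · rw [if_pos (by tauto), pvG_succ _ _ hk, if_pos hs]
      rfl
    · rw [if_neg (by rintro (h|h|h); exacts [hs (Or.inl h), hs (Or.inr h), by omega]),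
          ih (by omega), pvG_succ _ _ hk, if_neg hs]

-- ---- small glue lemmas ----
theorem pv_pyGet_neg_one {α : Type} (l : List α) (d : α) (h : l ≠ []) :
    (PySem.List.pyGet? l (-1)).getD d = l.getLast h := by
  have hl : 0 < l.length := List.length_pos_of_ne_nil h
  simp only [PySem.List.pyGet?, PySem.List.pyIdx?]
  rw [if_neg (by omega), if_pos (by omega)]
  simp only [Option.bind_some]
  rw [show (-(-1 : Int)).toNat = 1 from rfl,
      List.getElem?_eq_getElem (by omega), Option.getD_some, List.getLast_eq_getElem]

theorem pv_dropLast_map {α β : Type} (f : α → β) (l : List α) :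
    (l.map f).dropLast = l.dropLast.map f := by
  rw [List.dropLast_eq_take, List.dropLast_eq_take, List.map_take, List.length_map]

-- ===== VERDICT (by name: the statement is the Claim_ definition above) =====
set_option maxHeartbeats 2000000 in
theorem shorten_path_simple_py_spec : Claim_equal_shorten_path_simple_py := by
  intro path ml _
  unfold Spec_shorten_path_simple_py shorten_path_simple_py shorten_path_simple_py_alt
  dsimp only
  by_cases h1 : PySem.Str.len path ≤ ml
  · rw [if_pos h1, if_pos h1]
  · rw [if_neg h1, if_neg h1]
    have hsep : ("/" : String).toList = ['/'] := by decide
    have hparts : (PySem.Str.split? path "/").getD [] = (pvSos [] path.toList).map String.ofList := by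
      rw [PySem.Str.split?, hsep, PySem.Chars.split?]
      simp [pv_splitOn_eq]
    set cs := path.toList with hcs
    set partsc := pvSos [] cs with hpartsc
    have hpne : partsc ≠ [] := pvSos_ne_nil _ _
    have hplen : partsc.length = cs.count '/' + 1 := pv_length_pvSos _ _
    have hnos : ∀ p ∈ partsc, '/' ∉ p := fun p hp => pv_mem_pvSos _ _ p (by simp) hp
    have hjoin : PySem.Chars.join ['/'] partsc = cs := pv_join_pvSos _ []
    have hrf : PySem.Str.rfind path "/" = PySem.Chars.rfind cs ['/'] := by
      rw [PySem.Str.rfind, hsep]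
    by_cases hmem : '/' ∈ cs
    · -- the path contains a slash: both take the component branch
      have hcount : 0 < cs.count '/' := List.count_pos_iff.mpr hmem
      set qcs := partsc.dropLast with hqcs
      set fnc := partsc.getLast hpne with hfnc_def
      have hqf : qcs ++ [fnc] = partsc := List.dropLast_concat_getLast hpne
      have hqlen : qcs.length = partsc.length - 1 := by
        rw [hqcs, List.length_dropLast]
      have hqne : qcs ≠ [] := by
        apply List.ne_nil_of_length_pos; omega
      have hcs_eq : cs = pvH qcs ++ fnc := by
        rw [← hjoin, ← hqf, pv_join_snoc _ _ hqne]
      have hfnc : '/' ∉ fnc := hnos fnc (List.getLast_mem hpne)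
      have hqnos : ∀ b ∈ qcs, '/' ∉ b :=
        fun b hb => hnos b (List.Sublist.mem hb (List.dropLast_sublist _))
      obtain ⟨X, hX⟩ := pvH_ends_slash qcs hqne
      have hXlen : (pvH qcs).length = X.length + 1 := by rw [hX]; simp
      have hslash : PySem.Chars.rfind cs ['/'] = (X.length : Int) := by
        apply pv_rfind_eq_pos _ _ (by simp) X.length
        · rw [hcs_eq, hX, List.append_assoc, List.drop_left, List.singleton_append]
          exact List.cons_prefix_cons.mpr ⟨rfl, List.nil_prefix⟩
        · intro q0 hq0 hp
          rw [pv_single_prefix_iff] at hp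
          rw [hcs_eq, hX, List.getElem?_append_right (by simp; omega)] at hp
          exact hfnc (List.mem_of_getElem? hp)
      have hslash' : PySem.Chars.rfind cs ['/'] = ((pvH qcs).length : Int) - 1 := by
        rw [hslash]; omega
      -- guards
      rw [hparts, hrf]
      have hlenparts : (partsc.map String.ofList).length = partsc.length := by
        rw [List.length_map]
      have hg1 : (1 : Int) < ((partsc.map String.ofList).length : Int) := by
        rw [hlenparts]; omega
      have hg2 : ¬ (PySem.Chars.rfind cs ['/'] < 0) := by rw [hslash]; omega
      conv_lhs => rw [if_pos hg1]
      conv_rhs => rw [if_neg hg2]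
      -- filenames agree
      have hpmne : partsc.map String.ofList ≠ [] := by
        simp only [ne_eq, List.map_eq_nil_iff]; exact hpne
      have hfA : (PySem.List.pyGet? (partsc.map String.ofList) (-1)).getD ""
          = String.ofList fnc := by
        rw [pv_pyGet_neg_one _ _ hpmne, List.getLast_map]
      have hfB : PySem.Str.slice path (some (PySem.Chars.rfind cs ['/'] + 1)) none
          = String.ofList fnc := by
        apply String.toList_inj.mp
        rw [PySem.Str.toList_slice, ← hcs, hslash', PySem.Chars.slice,
            show ((pvH qcs).length : Int) - 1 + 1 = ((pvH qcs).length : Int) by ring,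
            PySem.List.slice_from _ (by positivity), Int.toNat_natCast, hcs_eq,
            List.drop_left, String.toList_ofList]
      rw [hfA, hfB]
      by_cases h3 : PySem.Str.len (String.ofList fnc) < ml - 3
      · have h3' : ¬ (ml - 3 ≤ PySem.Str.len (String.ofList fnc)) := by omega
        conv_lhs => rw [if_pos h3]
        conv_rhs => rw [if_neg h3']
        -- A's loop = formatting at the best index; B's string cut is the same candidate
        set parts := partsc.map String.ofList with hparts_def
        have hplen2 : parts.length = partsc.length := hlenparts
        have hk : parts.length - 2 < parts.dropLast.length := by
          rw [List.length_dropLast]; omega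
        have hcast : (parts.length : Int) - 2 = ((parts.length - 2 : Nat) : Int) := by
          omega
        rw [hcast, pvA_loop_eq parts ml _ (parts.length - 2) hk]
        have hqs : parts.dropLast = qcs.map String.ofList := by
          rw [hparts_def, pv_dropLast_map, hqcs, hpartsc]
        have hqsne : parts.dropLast ≠ [] := by
          rw [hqs]; simp only [ne_eq, List.map_eq_nil_iff]; exact hqne
        have hk2 : parts.length - 2 = parts.dropLast.length - 1 := by
          rw [List.length_dropLast]; omega
        rw [hk2, pvG_full _ hqsne]
        -- identify the two candidates
        obtain ⟨n, hn, hlt⟩ := pvGn_range parts.dropLast hqsne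
        have hqmap : parts.dropLast.map String.toList = qcs := by
          rw [hqs, List.map_map]
          simp [Function.comp_def]
        have hqslen : parts.dropLast.length = qcs.length := by
          rw [hqs, List.length_map]
        have hcut : max (PySem.Str.rfind (PySem.Str.slice path none (some (PySem.Chars.rfind cs ['/'] + 1))) "/tests/")
              (PySem.Str.rfind (PySem.Str.slice path none (some (PySem.Chars.rfind cs ['/'] + 1))) "/goesvfi/")
            = if pvGn parts.dropLast = 0 then -1
              else ((pvH (qcs.take n)).length : Int) - 1 := by
          have hhead : (PySem.Str.slice path none (some (PySem.Chars.rfind cs ['/'] + 1))).toList = pvH qcs := by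
            rw [PySem.Str.toList_slice, ← hcs, hslash', PySem.Chars.slice,
                show ((pvH qcs).length : Int) - 1 + 1 = ((pvH qcs).length : Int) by ring,
                PySem.List.slice_to _ (by positivity), Int.toNat_natCast, hcs_eq,
                List.take_left]
          rw [PySem.Str.rfind, PySem.Str.rfind, hhead,
              show ("/tests/" : String).toList = '/' :: ("tests".toList ++ ['/']) from by decide,
              show ("/goesvfi/" : String).toList = '/' :: ("goesvfi".toList ++ ['/']) from by decide,
              pv_rfind_pvH qcs _ hqnos (by decide), pv_rfind_pvH qcs _ hqnos (by decide)]
          have := pv_pos parts.dropLast hqsne (by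
            intro b hb
            have : b.toList ∈ qcs := by
              rw [← hqmap]; exact List.mem_map_of_mem hb
            exact hqnos _ this)
          rw [hqmap] at this
          rw [this, hn, Int.toNat_natCast]
        have hcand : PySem.Str.join "/" (PySem.List.slice parts (some (pvGn parts.dropLast)) none)
            = PySem.Str.slice path
                (some ((max (PySem.Str.rfind (PySem.Str.slice path none (some (PySem.Chars.rfind cs ['/'] + 1))) "/tests/")
                        (PySem.Str.rfind (PySem.Str.slice path none (some (PySem.Chars.rfind cs ['/'] + 1))) "/goesvfi/")) + 1)) none := by
          apply String.toList_inj.mp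
          rw [hcut, PySem.Str.toList_join, hsep]
          have hdrop : PySem.List.slice parts (some (pvGn parts.dropLast)) none = parts.drop n := by
            rw [hn, PySem.List.slice_from _ (by positivity), Int.toNat_natCast]
          have hpsplit : parts = parts.dropLast ++ [String.ofList fnc] := by
            rw [hqs, hparts_def, ← hqf, List.map_append]
            rfl
          have hdropq : parts.drop n = parts.dropLast.drop n ++ [String.ofList fnc] := by
            conv_lhs => rw [hpsplit]
            rw [List.drop_append_of_le_length (by omega)]
          have hdrmap : (parts.dropLast.drop n).map String.toList = qcs.drop n := by
            rw [List.map_drop, hqmap]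
          have hdrne : qcs.drop n ≠ [] := by
            apply List.ne_nil_of_length_pos
            rw [List.length_drop]
            omega
          rw [hdrop, hdropq, List.map_append, hdrmap]
          simp only [List.map_cons, List.map_nil, String.toList_ofList]
          rw [pv_join_snoc _ _ hdrne]
          -- now the B side
          rw [PySem.Str.toList_slice, ← hcs]
          by_cases h0 : pvGn parts.dropLast = 0
          · have hn0 : n = 0 := by rw [h0] at hn; exact_mod_cast hn.symm
            rw [if_pos h0, hn0]
            rw [show (-1 : Int) + 1 = 0 from by ring, PySem.Chars.slice,
                PySem.List.slice_from _ (le_refl 0), hcs_eq]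
            simp
          · rw [if_neg h0,
                show ((pvH (qcs.take n)).length : Int) - 1 + 1 = ((pvH (qcs.take n)).length : Int) from by ring,
                PySem.Chars.slice, PySem.List.slice_from _ (by positivity), Int.toNat_natCast,
                hcs_eq]
            conv_rhs => rw [show pvH qcs = pvH (qcs.take n) ++ pvH (qcs.drop n) from by
              rw [← pvH_append, List.take_append_drop]]
            rw [List.append_assoc, List.drop_left]
        rw [pvFmt, hcand]
      · have h3' : ml - 3 ≤ PySem.Str.len (String.ofList fnc) := by omega
        conv_lhs => rw [if_neg h3]
        conv_rhs => rw [if_pos h3']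
    · -- no slash: both take the tail-slice branch
      have hcount : cs.count '/' = 0 := List.count_eq_zero.mpr hmem
      rw [hparts, hrf]
      have hlen1 : ((pvSos [] cs).map String.ofList).length = 1 := by
        rw [List.length_map, ← hpartsc, hplen, hcount]
      rw [if_neg (by rw [hlen1]; norm_num),
          if_pos (by
            rw [pv_rfind_eq_neg _ _ (by
              intro p hp
              rw [pv_single_prefix_iff] at hp
              exact hmem (List.mem_of_getElem? hp))]
            norm_num)]
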